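-- pv_equiv track=rewrite | github.com/jonayerdi/genmorph | scripts/evaluation/compare_testsuite_mrs.py | merge_kills
-- ===== SOURCE A (Python) =====
-- from copy import deepcopy
--
-- def merge_kills(killed):
--     return list(map(lambda k: int(sum(k) != 0), zip(*killed)))
--     merged = deepcopy(next(killed))
--     if merged is None:
--         return None
--     for data in killed:
--         assert len(data) == len(merged), f'merge_kills mismatched lengths: {len(data)} != {len(merged)}'
--         merged = list(map(lambda k: int(bool(k[0] + k[1])), zip(merged, data)))
--     return merged
-- ===== SOURCE B (Python) =====
-- def merge_kills(killed):
--     it = iter(killed)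
--     first = next(it, None)
--     if first is None:
--         return []
--     acc = list(first)
--     for row in it:
--         acc = [m + b for m, b in zip(acc, row)]
--     return [int(s != 0) for s in acc]
-- ===== Notes on version B (the rewrite author's own statement) =====
-- stated objective: alternative
-- what changed: Replaces the transpose-then-map (zip(*killed)) with a single row-wise pass that maintains a running per-column integer sum accumulator, truncating to the shortest row via zip, then thresholds the sums at the end.
import Mathlib
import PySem

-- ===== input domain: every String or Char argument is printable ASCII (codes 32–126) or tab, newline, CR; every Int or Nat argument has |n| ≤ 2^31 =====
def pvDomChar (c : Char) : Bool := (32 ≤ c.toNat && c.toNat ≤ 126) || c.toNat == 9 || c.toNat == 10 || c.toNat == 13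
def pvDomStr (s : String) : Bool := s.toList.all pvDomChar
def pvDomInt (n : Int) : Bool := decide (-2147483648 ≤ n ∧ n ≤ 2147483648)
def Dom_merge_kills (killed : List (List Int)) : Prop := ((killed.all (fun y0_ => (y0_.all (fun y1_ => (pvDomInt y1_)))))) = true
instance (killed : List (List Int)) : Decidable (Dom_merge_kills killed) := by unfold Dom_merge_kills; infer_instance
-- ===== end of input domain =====

-- B replaces A's transpose-then-map (zip(*killed)) by one row-wise pass over a running per-column sum accumulator (alternative decomposition, same cost).

-- ===== PORT A =====
-- Python zip(*rows): stops at the first exhausted row; fuel bounds the number of columns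
-- (the first row's length suffices, since the result is never longer than any row).
def pvZipStar (fuel : Nat) (rows : List (List Int)) : List (List Int) :=
  match fuel with
  | 0 => []
  | fuel + 1 =>
    if rows.any (fun r => r.isEmpty) then []
    else (rows.map (fun r => r.headD 0)) :: pvZipStar fuel (rows.map (fun r => r.tail))

def merge_kills (killed : List (List Int)) : List Int :=
  match killed with
  | [] => []  -- zip(*[]) = zip() = empty
  | first :: _ =>
    (pvZipStar first.length killed).map (fun k => if k.sum ≠ 0 then 1 else 0)

-- ===== PORT B =====
-- acc = [m + b for m, b in zip(acc, row)]
def pvRowAdd (acc row : List Int) : List Int :=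
  (acc.zip row).map (fun p => p.1 + p.2)

def merge_kills_alt (killed : List (List Int)) : List Int :=
  match killed with
  | [] => []  -- next(it, None) is None
  | first :: rest =>
    (rest.foldl pvRowAdd first).map (fun s => if s ≠ 0 then 1 else 0)

-- ===== PRECONDITION & SPEC =====
def Spec_merge_kills (killed : List (List Int)) (out : List Int) : Prop := out = merge_kills_alt killed
instance (killed : List (List Int)) (out : List Int) : Decidable (Spec_merge_kills killed out) := by unfold Spec_merge_kills; infer_instance

-- ===== CLAIM (what is proved, stated in full; the proofs are below) =====
def Claim_equal_merge_kills : Prop := ∀ (killed : List (List Int)), Dom_merge_kills killed → Spec_merge_kills killed (merge_kills killed)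

-- ===== LEMMAS AND PROOFS =====

-- merging two leading rows into their column-wise sum preserves the column sums
theorem pvZipStar_merge (fuel : Nat) :
    ∀ (a r : List Int) (rest : List (List Int)),
      (pvZipStar fuel (a :: r :: rest)).map List.sum
        = (pvZipStar fuel (pvRowAdd a r :: rest)).map List.sum := by
  induction fuel with
  | zero => intro a r rest; simp [pvZipStar]
  | succ n ih =>
    intro a r rest
    cases a with
    | nil => simp [pvZipStar, pvRowAdd]
    | cons x xs =>
      cases r with
      | nil => simp [pvZipStar, pvRowAdd]
      | cons y ys =>
        by_cases h : rest.any (fun r => r.isEmpty)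
        · simp [pvZipStar, pvRowAdd, h]
        · simp only [pvZipStar, pvRowAdd, List.any_cons, List.isEmpty_cons,
            Bool.false_or, h, Bool.false_eq_true, reduceIte, List.zip_cons_cons,
            List.map_cons, List.headD_cons, List.tail_cons]
          rw [ih xs ys (rest.map (fun r => r.tail))]
          simp [pvRowAdd, add_assoc]

-- a single row transposes back to itself when the fuel covers its length
theorem pvZipStar_single (a : List Int) (fuel : Nat) (h : a.length ≤ fuel) :
    (pvZipStar fuel [a]).map List.sum = a := by
  induction a generalizing fuel with
  | nil =>
    cases fuel <;> simp [pvZipStar]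
  | cons x xs ih =>
    cases fuel with
    | zero => simp at h
    | succ n =>
      simp only [pvZipStar, List.any_cons, List.any_nil, List.isEmpty_cons,
        Bool.or_false, Bool.false_eq_true, reduceIte, List.map_cons, List.map_nil,
        List.headD_cons, List.tail_cons]
      rw [ih n (by simpa using Nat.succ_le_succ_iff.mp h)]
      simp

theorem pvRowAdd_length_le (a r : List Int) : (pvRowAdd a r).length ≤ a.length := by
  simp [pvRowAdd]

-- the column sums of the truncated transpose are the row-wise fold of pvRowAdd
theorem pvZipStar_foldl :
    ∀ (rest : List (List Int)) (a : List Int) (fuel : Nat), a.length ≤ fuel →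
      (pvZipStar fuel (a :: rest)).map List.sum = rest.foldl pvRowAdd a := by
  intro rest
  induction rest with
  | nil => intro a fuel h; simpa using pvZipStar_single a fuel h
  | cons r rest ih =>
    intro a fuel h
    rw [List.foldl_cons, ← ih (pvRowAdd a r) fuel (le_trans (pvRowAdd_length_le a r) h)]
    exact pvZipStar_merge fuel a r rest

-- ===== VERDICT (by name: the statement is the Claim_ definition above) =====
theorem merge_kills_spec : Claim_equal_merge_kills := by
  intro killed _
  unfold Spec_merge_kills
  cases killed with
  | nil => rfl
  | cons first rest =>
    simp only [merge_kills, merge_kills_alt]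
    rw [← pvZipStar_foldl rest first first.length le_rfl, List.map_map]
    rfl
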